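-- pv_equiv track=rewrite | github.com/iamkatkov/PPP_25-26_1sem | 1lab/main.py | f
-- ===== SOURCE A (Python) =====
-- def f(seats, K):
--     N = len(seats)
--     if N == 0:
--         return (-1, -1)
--     M = len(seats[0])
--
--     for i in range(N):
--         k = 0
--         for j in range(M):
--             if seats[i][j] == 0:
--                 k += 1
--                 if k == K:
--                     start = j - K + 1
--                     for pos in range(start, j + 1):
--                         seats[i][pos] = 1
--                     return (i, start)
--             else:
--                 k = 0
--     return (-1, -1)
-- ===== SOURCE B (Python) =====
-- def f(seats, K):
--     # Window-scan re-implementation; performs the same in-place mutation as the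
--     # original (sets the K found cells to 1). Equivalence is about the return value.
--     if not seats:
--         return (-1, -1)
--     M = len(seats[0])
--     if K <= 0 or K > M:
--         return (-1, -1)
--     for i, row in enumerate(seats):
--         for j in range(M - K + 1):
--             if all(row[j + t] == 0 for t in range(K)):
--                 for t in range(K):
--                     row[j + t] = 1
--                 return (i, j)
--     return (-1, -1)
-- ===== Notes on version B (the rewrite author's own statement) =====
-- stated objective: alternative
-- what changed: Replaced the streak-counter scan (count consecutive zeros, return at the K-th zero) by a sliding-window scan: for each row try every start j in range(M-K+1) and test the K-wide window element-by-element; measured faster via the early return for K<=0 or K>M (no scan at all) and the short-circuiting all() that abandons a window at its first occupied seat; same return value and same in-place mutation of the K found cells.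
-- outside the precondition, e.g. on f([[0, 5], [0]], 1): A returns (0, 0), B returns (0, 0)
import Mathlib
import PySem

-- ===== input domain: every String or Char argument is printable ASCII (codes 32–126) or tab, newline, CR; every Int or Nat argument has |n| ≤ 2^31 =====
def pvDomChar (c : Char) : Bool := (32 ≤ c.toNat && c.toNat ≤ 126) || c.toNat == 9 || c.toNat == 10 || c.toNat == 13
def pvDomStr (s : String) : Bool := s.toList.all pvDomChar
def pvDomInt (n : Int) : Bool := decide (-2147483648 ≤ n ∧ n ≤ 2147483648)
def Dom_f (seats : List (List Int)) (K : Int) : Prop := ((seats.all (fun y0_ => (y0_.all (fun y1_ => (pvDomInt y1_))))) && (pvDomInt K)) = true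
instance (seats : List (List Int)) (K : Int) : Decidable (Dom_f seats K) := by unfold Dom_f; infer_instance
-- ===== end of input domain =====

-- B replaces A's streak-counter scan by a sliding-window scan (try each start, test the
-- whole window) with an early return for K<=0 or K>M; return values agree on Pre_.
-- Both Pythons mutate the found K cells in place identically; the equivalence proved
-- here is about the RETURN value (the ports are pure).

-- ===== PORT A =====
-- inner loop 'for j in range(M): …' with streak counter k; returns start on success
def aRow (row : List Int) (K : Int) : List Nat → Int → Option Int
  | [], _ => none
  | j :: rest, k =>
    if PySem.List.pyGetD row (j : Int) 0 = 0 then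
      if k + 1 = K then some ((j : Int) - K + 1)
      else aRow row K rest (k + 1)
    else aRow row K rest 0

-- outer loop 'for i in range(N): …'
def aRows (K : Int) (M : Nat) (i : Int) : List (List Int) → Int × Int
  | [] => (-1, -1)
  | row :: rest =>
    match aRow row K (List.range M) 0 with
    | some s => (i, s)
    | none => aRows K M (i + 1) rest

def f (seats : List (List Int)) (K : Int) : Int × Int :=
  if seats.length = 0 then (-1, -1)
  else aRows K (seats.headD []).length 0 seats

-- ===== PORT B =====
-- 'all(row[j+t] == 0 for t in range(K))'
def bWin (row : List Int) (K : Int) (j : Nat) : Bool :=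
  (List.range K.toNat).all (fun t => PySem.List.pyGetD row ((j : Int) + (t : Int)) 0 == 0)

-- 'for j in range(M - K + 1): if all(...): return j'
def bRow (row : List Int) (K : Int) (W : Nat) : Option Nat :=
  (List.range W).find? (fun j => bWin row K j)

-- 'for i, row in enumerate(seats): …'
def bRows (K : Int) (W : Nat) (i : Int) : List (List Int) → Int × Int
  | [] => (-1, -1)
  | row :: rest =>
    match bRow row K W with
    | some j => (i, (j : Int))
    | none => bRows K W (i + 1) rest

def f_alt (seats : List (List Int)) (K : Int) : Int × Int :=
  match seats with
  | [] => (-1, -1)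
  | r0 :: _ =>
    if K ≤ 0 ∨ (r0.length : Int) < K then (-1, -1)
    else bRows K (r0.length + 1 - K.toNat) 0 seats

-- ===== PRECONDITION & SPEC =====
-- Pre_ excludes ragged inputs with a row shorter than row 0: A indexes every row it
-- scans up to len(seats[0]) and raises IndexError on such rows; this conservatively
-- also excludes inputs where A succeeds before reaching the short row (see cites).
def Pre_f (seats : List (List Int)) (K : Int) : Prop :=
  ∀ r ∈ seats, (seats.headD []).length ≤ r.length
instance (seats : List (List Int)) (K : Int) : Decidable (Pre_f seats K) := by
  unfold Pre_f; infer_instance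
def pvWitness_f : List (List Int) × Int := ([[1, 0], [0, 0]], 2)
def Spec_f (seats : List (List Int)) (K : Int) (out : Int × Int) : Prop := out = f_alt seats K
instance (seats : List (List Int)) (K : Int) (out : Int × Int) : Decidable (Spec_f seats K out) := by unfold Spec_f; infer_instance

-- ===== CLAIM (what is proved, stated in full; the proofs are below) =====
def Claim_equal_f : Prop := ∀ (seats : List (List Int)) (K : Int), Dom_f seats K → Pre_f seats K → Spec_f seats K (f seats K)

-- ===== LEMMAS AND PROOFS =====

-- K ≤ 0: the streak counter (kept ≥ 0) never equals K
lemma aRow_none_of_nonpos (row : List Int) (K : Int) (hK : K ≤ 0) :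
    ∀ (js : List Nat) (k : Int), 0 ≤ k → aRow row K js k = none := by
  intro js
  induction js with
  | nil => intro k _; rfl
  | cons j rest ih =>
    intro k hk
    simp only [aRow]
    split
    · rw [if_neg (by omega)]
      exact ih (k + 1) (by omega)
    · exact ih 0 le_rfl

lemma aRows_none_of_nonpos (K : Int) (hK : K ≤ 0) (M : Nat) :
    ∀ (rows : List (List Int)) (i : Int), aRows K M i rows = (-1, -1) := by
  intro rows
  induction rows with
  | nil => intro i; rfl
  | cons row rest ih =>
    intro i
    simp only [aRows, aRow_none_of_nonpos row K hK (List.range M) 0 le_rfl]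
    exact ih (i + 1)

-- the window test, in terms of List.getD
lemma bWin_iff (row : List Int) (Kn : Nat) (s : Nat) :
    bWin row (Kn : Int) s = true ↔ ∀ t < Kn, row.getD (s + t) 0 = 0 := by
  simp only [bWin, List.all_eq_true, List.mem_range, Int.toNat_natCast]
  constructor
  · intro h t ht
    have := h t ht
    rwa [← Nat.cast_add, PySem.List.pyGetD_natCast, beq_iff_eq] at this
  · intro h t ht
    rw [← Nat.cast_add, PySem.List.pyGetD_natCast, beq_iff_eq]
    exact h t ht

-- a window starting at s ≤ j with s + Kn > j fails when cell j is nonzero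
lemma bWin_false_of_bad (row : List Int) (Kn : Nat) (s j : Nat)
    (hsj : s ≤ j) (hjs : j < s + Kn) (hj : row.getD j 0 ≠ 0) :
    ¬ bWin row (Kn : Int) s = true := by
  intro h
  exact hj (by have := (bWin_iff row Kn s).1 h (j - s) (by omega); rwa [Nat.add_sub_cancel' hsj] at this)

-- MAIN invariant: A's streak scan from position j with current streak k computes the
-- first all-zero window starting at or after j - k.
lemma aRow_inv (row : List Int) (Kn : Nat) (hK : 1 ≤ Kn) (M : Nat) (hM : M ≤ row.length) :
    ∀ (cnt j k : Nat), j + cnt = M → k ≤ j → k < Kn →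
    (∀ t, j - k ≤ t → t < j → row.getD t 0 = 0) →
    aRow row (Kn : Int) (List.range' j cnt) (k : Int) =
      ((List.range' (j - k) (M + 1 - Kn - (j - k))).find? (fun s => bWin row (Kn : Int) s)).map
        (fun s => (s : Int)) := by
  intro cnt
  induction cnt with
  | zero =>
    intro j k hjM hkj hkK _
    have hz : M + 1 - Kn - (j - k) = 0 := by omega
    rw [hz]
    simp [aRow]
  | succ cnt ih =>
    intro j k hjM hkj hkK hstreak
    have hjget : PySem.List.pyGetD row ((j : Nat) : Int) 0 = row.getD j 0 :=
      PySem.List.pyGetD_natCast row j 0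
    rw [List.range'_succ]
    simp only [aRow, hjget]
    by_cases hz : row.getD j 0 = 0
    · rw [if_pos hz]
      by_cases hkK1 : (k : Int) + 1 = (Kn : Int)
      · rw [if_pos hkK1]
        have hkKn : k + 1 = Kn := by exact_mod_cast hkK1
        have hcnt : M + 1 - Kn - (j - k) = (M - Kn - (j - k)) + 1 := by omega
        rw [hcnt, List.range'_succ, List.find?_cons_of_pos (by
          rw [bWin_iff]
          intro t ht
          rcases Nat.lt_or_ge (j - k + t) j with h | h
          · exact hstreak _ (by omega) h
          · have hje : j - k + t = j := by omega
            rwa [hje])]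
        show some ((j : Int) - (Kn : Int) + 1) = some (((j - k : Nat) : Int))
        congr 1
        omega
      · rw [if_neg hkK1]
        have hkK' : k + 1 < Kn := by
          have hne : ¬ k + 1 = Kn := fun h => hkK1 (by exact_mod_cast h)
          omega
        have hrec := ih (j + 1) (k + 1) (by omega) (by omega) hkK'
          (by
            intro t ht1 ht2
            rcases Nat.lt_or_ge t j with h | h
            · exact hstreak t (by omega) h
            · have ht : t = j := by omega
              rwa [ht])
        rw [show (j + 1) - (k + 1) = j - k from by omega] at hrec
        rw [show ((k : Int) + 1) = ((k + 1 : Nat) : Int) from by push_cast; ring]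
        exact hrec
    · rw [if_neg hz]
      have hrec := ih (j + 1) 0 (by omega) (by omega) (by omega) (by intro t ht1 ht2; omega)
      rw [Nat.sub_zero] at hrec
      rw [show (0 : Int) = ((0 : Nat) : Int) from rfl, hrec]
      have key : (List.range' (j - k) (M + 1 - Kn - (j - k))).find? (fun s => bWin row (Kn : Int) s)
          = (List.range' (j + 1) (M + 1 - Kn - (j + 1))).find? (fun s => bWin row (Kn : Int) s) := by
        rcases Nat.lt_or_ge (j + 1) (M + 1 - Kn) with hL | hL
        · have hsplit : List.range' (j - k) (M + 1 - Kn - (j - k)) =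
              List.range' (j - k) (k + 1) ++ List.range' (j + 1) (M + 1 - Kn - (j + 1)) := by
            calc List.range' (j - k) (M + 1 - Kn - (j - k))
                = List.range' (j - k) ((k + 1) + (M + 1 - Kn - (j + 1))) := by
                  rw [show M + 1 - Kn - (j - k) = (k + 1) + (M + 1 - Kn - (j + 1)) from by omega]
              _ = List.range' (j - k) (k + 1) ++
                    List.range' ((j - k) + (k + 1)) (M + 1 - Kn - (j + 1)) :=
                  List.range'_append_1.symm
              _ = List.range' (j - k) (k + 1) ++
                    List.range' (j + 1) (M + 1 - Kn - (j + 1)) := by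
                  rw [show (j - k) + (k + 1) = j + 1 from by omega]
          rw [hsplit, List.find?_append]
          have hnone : (List.range' (j - k) (k + 1)).find? (fun s => bWin row (Kn : Int) s)
              = none := by
            simp only [List.find?_eq_none]
            intro s hs
            rw [List.mem_range'_1] at hs
            exact bWin_false_of_bad row Kn s j (by omega) (by omega) hz
          rw [hnone]
          simp
        · have h2 : M + 1 - Kn - (j + 1) = 0 := by omega
          rw [h2, List.range'_zero, List.find?_nil]
          simp only [List.find?_eq_none]
          intro s hs
          rw [List.mem_range'_1] at hs
          exact bWin_false_of_bad row Kn s j (by omega) (by omega) hz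
      rw [key]

lemma aRow_eq (row : List Int) (K : Int) (hK : 0 < K) (M : Nat) (hM : M ≤ row.length) :
    aRow row K (List.range M) 0 =
      ((List.range (M + 1 - K.toNat)).find? (fun s => bWin row K s)).map (fun s => (s : Int)) := by
  have h0 := aRow_inv row K.toNat (by omega) M hM M 0 0 (by omega) le_rfl (by omega)
    (by intro t ht1 ht2; omega)
  rw [Nat.sub_zero, Nat.sub_zero, Int.toNat_of_nonneg (by omega : (0 : Int) ≤ K)] at h0
  rw [List.range_eq_range', List.range_eq_range']
  simpa using h0

-- K > M: every per-row window range is empty, so A finds nothing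
lemma aRows_none_of_big (K : Int) (hK : 0 < K) (M : Nat) (hKM : (M : Int) < K) :
    ∀ (rows : List (List Int)) (i : Int), (∀ r ∈ rows, M ≤ r.length) →
      aRows K M i rows = (-1, -1) := by
  intro rows
  induction rows with
  | nil => intro i _; rfl
  | cons row rest ih =>
    intro i hlen
    have h0 : M + 1 - K.toNat = 0 := by omega
    simp only [aRows, aRow_eq row K hK M (hlen row (by simp)), h0, List.range_zero,
      List.find?_nil]
    exact ih (i + 1) (fun r hr => hlen r (by simp [hr]))

-- 0 < K ≤ M: row-by-row agreement
lemma aRows_eq_bRows (K : Int) (hK : 0 < K) (M : Nat) :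
    ∀ (rows : List (List Int)) (i : Int), (∀ r ∈ rows, M ≤ r.length) →
      aRows K M i rows = bRows K (M + 1 - K.toNat) i rows := by
  intro rows
  induction rows with
  | nil => intro i _; rfl
  | cons row rest ih =>
    intro i hlen
    simp only [aRows, bRows, bRow, aRow_eq row K hK M (hlen row (by simp))]
    cases h : (List.range (M + 1 - K.toNat)).find? (fun s => bWin row K s) with
    | none =>
      exact ih (i + 1) (fun r hr => hlen r (by simp [hr]))
    | some s => rfl

-- ===== VERDICT (by name: the statement is the Claim_ definition above) =====
theorem f_spec : Claim_equal_f := by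
  intro seats K _ hpre
  unfold Spec_f
  match seats with
  | [] => rfl
  | r0 :: rest =>
    simp only [f, f_alt, List.length_cons, List.headD_cons]
    rw [if_neg (by omega)]
    by_cases hK : K ≤ 0
    · rw [if_pos (Or.inl hK)]
      exact aRows_none_of_nonpos K hK r0.length (r0 :: rest) 0
    · have hK' : 0 < K := by omega
      by_cases hKM : (r0.length : Int) < K
      · rw [if_pos (Or.inr hKM)]
        exact aRows_none_of_big K hK' r0.length hKM (r0 :: rest) 0
          (by intro r hr; exact hpre r hr)
      · rw [if_neg (by tauto)]
        exact aRows_eq_bRows K hK' r0.length (r0 :: rest) 0 (by intro r hr; exact hpre r hr)
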